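-- pv_equiv track=rewrite | github.com/moopyglue/advent_code_2021 | day20 trench map/part1and2.py | remap
-- ===== SOURCE A (Python) =====
-- def pad(sa,c):
--     newsa=[ c*(len(sa[0])+2) ]
--     for n in sa:
--         newsa.append(c+n+c)
--     newsa.append(c*(len(sa[0])+2))
--     return newsa
--
-- def remap(map,decoder,padding):
--
--     map=map.copy()
--     newmap=[]
--     map=pad(map,padding)
--     map=pad(map,padding)
--     for y in range(len(map)-2):
--         newmap.append("")
--         for x in range(len(map[y])-2):
--             k=map[y][x:x+3]+map[y+1][x:x+3]+map[y+2][x:x+3]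
--             newmap[-1]+=decoder[int(k,2)]
--     return newmap
-- ===== SOURCE B (Python) =====
-- def remap(map, decoder, padding):
--     # B: pad once in closed form, precompute a per-row table of 3-bit column
--     # windows, then combine three vertically adjacent table entries arithmetically.
--     L = len(map[0])
--     border = padding * (L + 4)
--     w = padding * 2
--     rows = [border, border] + [w + r + w for r in map] + [border, border]
--     col3 = [[int(r[x:x + 3], 2) for x in range(len(r) - 2)] for r in rows]
--     return [
--         "".join(decoder[col3[y][x] * 64 + col3[y + 1][x] * 8 + col3[y + 2][x]]
--                 for x in range(len(col3[y])))
--         for y in range(len(rows) - 2)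
--     ]
-- ===== Notes on version B (the rewrite author's own statement) =====
-- stated objective: alternative
-- what changed: B pads once in closed form and precomputes a per-row table of 3-bit column-window values, then combines three vertically adjacent table entries arithmetically (v0*64+v1*8+v2), instead of A's per-cell 9-character slice concatenation and base-2 string reparsing inside nested loops.
-- outside the precondition, e.g. on remap(['0', '00'], 'x', '0'): A returns ['xxx', 'xxx', 'xxx', 'xxxx'], B raises IndexError; on remap(['0'], 'x', '00'): A returns ['xxxxxxxxxxxxxx', 'xxxxxxxx', 'xxxxxxx'], B raises IndexError
import Mathlib
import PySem

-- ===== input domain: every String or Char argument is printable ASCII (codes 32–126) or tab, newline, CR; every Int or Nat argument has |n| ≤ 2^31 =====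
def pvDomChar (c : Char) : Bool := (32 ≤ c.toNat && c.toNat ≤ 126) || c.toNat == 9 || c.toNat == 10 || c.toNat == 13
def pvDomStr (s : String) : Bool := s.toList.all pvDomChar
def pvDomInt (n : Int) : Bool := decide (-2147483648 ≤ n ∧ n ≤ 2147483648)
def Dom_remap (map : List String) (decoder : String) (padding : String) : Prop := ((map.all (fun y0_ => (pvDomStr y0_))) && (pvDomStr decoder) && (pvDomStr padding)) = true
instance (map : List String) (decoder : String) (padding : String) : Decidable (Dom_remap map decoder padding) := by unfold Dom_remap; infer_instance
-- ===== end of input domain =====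

-- B precomputes a per-row table of 3-bit column-window values and combines three
-- vertically adjacent entries arithmetically, instead of A's repeated 9-character
-- slicing and base-2 reparsing per output cell (objective: alternative decomposition).

-- ===== PORT A =====
-- Python s*n (string repetition), over List Char
def pvRep (c : List Char) (n : Nat) : List Char := (List.replicate n c).flatten

-- Python int(k,2): exact for nonempty strings of '0'/'1' chars (guaranteed inside Pre_remap,
-- where Python would otherwise raise ValueError)
def pvParse2 (l : List Char) : Nat := l.foldl (fun a c => 2 * a + (if c = '1' then 1 else 0)) 0

-- Python decoder[k]: exact for k < decoder.length (guaranteed inside Pre_remap,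
-- where Python would otherwise raise IndexError)
def pvDec (decoder : List Char) (k : Nat) : Char := decoder.getD k ' '

-- Python pad(sa,c); sa[0] on empty sa raises in Python (excluded by Pre_remap)
def pvPad (sa : List (List Char)) (c : List Char) : List (List Char) :=
  let border := pvRep c ((sa.headD []).length + 2)
  (border :: sa.map (fun n => c ++ n ++ c)) ++ [border]

-- Python slice r[x:x+3] for x ≥ 0 is exactly (r.drop x).take 3
def remap (map : List String) (decoder : String) (padding : String) : List String :=
  let m1 := pvPad (map.map String.toList) padding.toList
  let m2 := pvPad m1 padding.toList
  ((List.range (m2.length - 2)).foldl (fun newmap y =>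
      newmap ++ [(List.range ((m2.getD y []).length - 2)).foldl (fun row x =>
          row ++ [pvDec decoder.toList (pvParse2
            (((m2.getD y []).drop x).take 3 ++ ((m2.getD (y+1) []).drop x).take 3
              ++ ((m2.getD (y+2) []).drop x).take 3))]) []]) []).map String.mk

-- ===== PORT B =====
def remap_alt (map : List String) (decoder : String) (padding : String) : List String :=
  let L := ((map.headD "").toList).length
  let border := pvRep padding.toList (L + 4)
  let w := pvRep padding.toList 2
  let rows := [border, border] ++ map.map (fun r => w ++ r.toList ++ w) ++ [border, border]
  let col3 := rows.map (fun r => (List.range (r.length - 2)).map (fun x => pvParse2 ((r.drop x).take 3)))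
  (List.range (rows.length - 2)).map (fun y =>
    String.mk ((List.range ((col3.getD y []).length)).map (fun x =>
      pvDec decoder.toList ((col3.getD y []).getD x 0 * 64 + (col3.getD (y+1) []).getD x 0 * 8
        + (col3.getD (y+2) []).getD x 0))))

-- ===== PRECONDITION & SPEC =====
-- the twice-padded grid A works on (closed form), used only to state Pre_remap
def pvGrid (map : List String) (p : Char) : List (List Char) :=
  [List.replicate (((map.headD "").toList).length + 4) p,
   List.replicate (((map.headD "").toList).length + 4) p]
  ++ map.map (fun r => [p, p] ++ r.toList ++ [p, p])
  ++ [List.replicate (((map.headD "").toList).length + 4) p,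
      List.replicate (((map.headD "").toList).length + 4) p]

-- Pre_ covers A's two returning regimes: (i) the puzzle's natural domain — a nonempty
-- rectangular image of '0'/'1' chars, a one-char binary padding, every 3x3 window code a
-- valid index into decoder (A's decoder[int(k,2)] raises IndexError beyond it, int(k,2)
-- raises ValueError on non-binary chars, map[0] raises IndexError on an empty map) — and
-- (ii) the degenerate regime padding = "" with all rows shorter than 3, where no window
-- exists and A returns empty strings.  Ragged rows and multi-char paddings are excluded
-- although A can return on them: there A's windows are not 3x3 blocks of a rectangle but
-- accidents of slicing short rows — see cites.
def Pre_remap (map : List String) (decoder : String) (padding : String) : Prop :=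
  map ≠ [] ∧
  (((map.all (fun s => s.toList.length == ((map.headD "").toList).length
        && s.toList.all (fun c => c == '0' || c == '1'))) = true ∧
    (padding.toList = ['0'] ∨ padding.toList = ['1']) ∧
    ((List.range (map.length + 2)).all (fun y =>
      (List.range (((map.headD "").toList).length + 2)).all (fun x =>
        decide (pvParse2 ((((pvGrid map (padding.toList.headD '0')).getD y []).drop x).take 3
          ++ (((pvGrid map (padding.toList.headD '0')).getD (y+1) []).drop x).take 3
          ++ (((pvGrid map (padding.toList.headD '0')).getD (y+2) []).drop x).take 3)
          < decoder.toList.length)))) = true) ∨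
   (padding.toList = [] ∧ (map.all (fun s => decide (s.toList.length ≤ 2))) = true))

instance (map : List String) (decoder : String) (padding : String) : Decidable (Pre_remap map decoder padding) := by unfold Pre_remap; infer_instance

def pvWitness_remap : List String × String × String := (["00", "00"], "ab", "0")

def Spec_remap (map : List String) (decoder : String) (padding : String) (out : List String) : Prop := out = remap_alt map decoder padding
instance (map : List String) (decoder : String) (padding : String) (out : List String) : Decidable (Spec_remap map decoder padding out) := by unfold Spec_remap; infer_instance

-- ===== CLAIM (what is proved, stated in full; the proofs are below) =====
def Claim_equal_remap : Prop := ∀ (map : List String) (decoder : String) (padding : String), Dom_remap map decoder padding → Pre_remap map decoder padding → Spec_remap map decoder padding (remap map decoder padding)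

-- ===== LEMMAS AND PROOFS =====

theorem pvRep_single (p : Char) (n : Nat) : pvRep [p] n = List.replicate n p := by
  induction n with
  | zero => rfl
  | succ k ih => simp only [pvRep, List.replicate_succ, List.flatten_cons] at ih ⊢
                 simp [ih]

theorem foldl_append_map {α β : Type} (f : α → β) (l : List α) (acc : List β) :
    l.foldl (fun a i => a ++ [f i]) acc = acc ++ l.map f := by
  induction l generalizing acc with
  | nil => simp
  | cons x xs ih => simp [List.foldl_cons, ih]

theorem pvParse2_go (l : List Char) (a : Nat) :
    l.foldl (fun a c => 2 * a + (if c = '1' then 1 else 0)) a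
      = a * 2 ^ l.length + pvParse2 l := by
  induction l generalizing a with
  | nil => simp [pvParse2]
  | cons c cs ih =>
      simp only [List.foldl_cons, List.length_cons, pvParse2] at *
      rw [ih, ih (2 * 0 + _)]
      ring

theorem pvParse2_append (u v : List Char) :
    pvParse2 (u ++ v) = pvParse2 u * 2 ^ v.length + pvParse2 v := by
  simp only [pvParse2, List.foldl_append]
  exact pvParse2_go v _

theorem pvRep_nil (n : Nat) : pvRep ([] : List Char) n = [] := by
  induction n with
  | zero => rfl
  | succ k ih => simp [pvRep, List.replicate_succ] at ih ⊢

theorem padded_eq_nil (map : List String) :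
    pvPad (pvPad (map.map String.toList) []) []
      = [[], []] ++ map.map String.toList ++ [[], []] := by
  simp [pvPad, pvRep_nil]

-- padded grid: both ports build the same list of char rows
theorem padded_eq (map : List String) (p : Char) :
    pvPad (pvPad (map.map String.toList) [p]) [p]
      = [List.replicate (((map.headD "").toList).length + 4) p,
         List.replicate (((map.headD "").toList).length + 4) p]
        ++ map.map (fun r => [p, p] ++ r.toList ++ [p, p])
        ++ [List.replicate (((map.headD "").toList).length + 4) p,
            List.replicate (((map.headD "").toList).length + 4) p] := by
  have hhead : (map.map String.toList).headD [] = (map.headD "").toList := by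
    cases map <;> simp
  have hw : ∀ n : Nat, p :: (List.replicate n p ++ [p]) = List.replicate (n + 2) p := by
    intro n
    rw [show n + 2 = (n + 1) + 1 by omega, List.replicate_succ, List.replicate_succ']
  simp only [pvPad, pvRep_single, hhead, List.cons_append, List.headD_cons,
    List.length_replicate, List.map_append, List.map_cons, List.map_map, List.map_nil,
    List.nil_append, List.append_assoc, hw,
    show ((map.headD "").toList).length + 2 + 2 = ((map.headD "").toList).length + 4 by omega,
    List.cons.injEq, true_and]
  congr 1
  exact List.map_congr_left (fun r _ => by simp)

theorem getD_range_map {α : Type} (f : Nat → α) (n x : Nat) (d : α) (hx : x < n) :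
    (((List.range n).map f).getD x d) = f x := by
  rw [List.getD_eq_getElem _ _ (by simpa using hx)]
  simp

-- the combine step on the abstract padded grid
theorem core (M : List (List Char)) (D : List Char) (L : Nat)
    (hrow : ∀ r ∈ M, r.length = L + 4) :
    ((List.range (M.length - 2)).foldl (fun newmap y =>
        newmap ++ [(List.range ((M.getD y []).length - 2)).foldl (fun row x =>
            row ++ [pvDec D (pvParse2
              (((M.getD y []).drop x).take 3 ++ ((M.getD (y+1) []).drop x).take 3
                ++ ((M.getD (y+2) []).drop x).take 3))]) []]) []).map String.mk
    = (List.range (M.length - 2)).map (fun y =>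
        String.mk ((List.range (((M.map (fun r => (List.range (r.length - 2)).map
              (fun x => pvParse2 ((r.drop x).take 3)))).getD y []).length)).map (fun x =>
          pvDec D (((M.map (fun r => (List.range (r.length - 2)).map
              (fun x => pvParse2 ((r.drop x).take 3)))).getD y []).getD x 0 * 64
            + ((M.map (fun r => (List.range (r.length - 2)).map
              (fun x => pvParse2 ((r.drop x).take 3)))).getD (y+1) []).getD x 0 * 8
            + ((M.map (fun r => (List.range (r.length - 2)).map
              (fun x => pvParse2 ((r.drop x).take 3)))).getD (y+2) []).getD x 0)))) := by
  have hget : ∀ y (hy : y < M.length), M.getD y [] = M[y]'hy := fun y hy =>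
    List.getD_eq_getElem M [] hy
  have hlen : ∀ y (hy : y < M.length), (M[y]'hy).length = L + 4 := fun y hy =>
    hrow _ (List.getElem_mem hy)
  have hcol : ∀ y (hy : y < M.length),
      (M.map (fun r => (List.range (r.length - 2)).map
        (fun x => pvParse2 ((r.drop x).take 3)))).getD y []
      = (List.range (L + 2)).map (fun x => pvParse2 (((M[y]'hy).drop x).take 3)) := by
    intro y hy
    rw [List.getD_eq_getElem _ _ (by simpa using hy)]
    simp [hlen y hy]
  rw [foldl_append_map]
  simp only [List.nil_append, List.map_map]
  apply List.map_congr_left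
  intro y hy
  rw [List.mem_range] at hy
  have hy0 : y < M.length := by omega
  have hy1 : y + 1 < M.length := by omega
  have hy2 : y + 2 < M.length := by omega
  simp only [Function.comp_apply]
  congr 1
  rw [hget y hy0, hlen y hy0, foldl_append_map, hcol y hy0, hcol (y+1) hy1, hcol (y+2) hy2]
  rw [show L + 4 - 2 = L + 2 by omega]
  simp only [List.length_map, List.length_range, List.nil_append]
  apply List.map_congr_left
  intro x hx
  rw [List.mem_range] at hx
  rw [hget (y+1) hy1, hget (y+2) hy2]
  rw [getD_range_map _ _ _ _ hx, getD_range_map _ _ _ _ hx, getD_range_map _ _ _ _ hx]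
  congr 1
  have hl1 : (((M[y+1]'hy1).drop x).take 3).length = 3 := by
    simp [hlen (y+1) hy1]; omega
  have hl2 : (((M[y+2]'hy2).drop x).take 3).length = 3 := by
    simp [hlen (y+2) hy2]; omega
  rw [List.append_assoc, pvParse2_append, pvParse2_append, List.length_append, hl1, hl2]
  norm_num
  omega

-- the degenerate regime: every row shorter than 3, no window, both sides all-empty rows
theorem core2 (M : List (List Char)) (D : List Char)
    (hrow : ∀ r ∈ M, r.length ≤ 2) :
    ((List.range (M.length - 2)).foldl (fun newmap y =>
        newmap ++ [(List.range ((M.getD y []).length - 2)).foldl (fun row x =>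
            row ++ [pvDec D (pvParse2
              (((M.getD y []).drop x).take 3 ++ ((M.getD (y+1) []).drop x).take 3
                ++ ((M.getD (y+2) []).drop x).take 3))]) []]) []).map String.mk
    = (List.range (M.length - 2)).map (fun y =>
        String.mk ((List.range (((M.map (fun r => (List.range (r.length - 2)).map
              (fun x => pvParse2 ((r.drop x).take 3)))).getD y []).length)).map (fun x =>
          pvDec D (((M.map (fun r => (List.range (r.length - 2)).map
              (fun x => pvParse2 ((r.drop x).take 3)))).getD y []).getD x 0 * 64
            + ((M.map (fun r => (List.range (r.length - 2)).map
              (fun x => pvParse2 ((r.drop x).take 3)))).getD (y+1) []).getD x 0 * 8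
            + ((M.map (fun r => (List.range (r.length - 2)).map
              (fun x => pvParse2 ((r.drop x).take 3)))).getD (y+2) []).getD x 0)))) := by
  have h0 : ∀ z, (M.getD z []).length ≤ 2 := by
    intro z
    by_cases hz : z < M.length
    · rw [List.getD_eq_getElem _ _ hz]
      exact hrow _ (List.getElem_mem hz)
    · rw [List.getD_eq_default _ _ (by omega)]
      simp
  rw [foldl_append_map]
  simp only [List.nil_append, List.map_map]
  apply List.map_congr_left
  intro y hy
  rw [List.mem_range] at hy
  have hy0 : y < M.length := by omega
  simp only [Function.comp_apply]
  congr 1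
  rw [show (M.getD y []).length - 2 = 0 by have := h0 y; omega]
  have hcl : ((M.map (fun r => (List.range (r.length - 2)).map
      (fun x => pvParse2 ((r.drop x).take 3)))).getD y []).length = 0 := by
    rw [List.getD_eq_getElem _ _ (by simpa using hy0)]
    have := hrow _ (List.getElem_mem hy0)
    simp
    omega
  rw [hcl]
  simp

-- ===== VERDICT (by name: the statement is the Claim_ definition above) =====
theorem remap_spec : Claim_equal_remap := by
  intro map decoder padding _ hpre
  obtain ⟨hne, hcase⟩ := hpre
  unfold Spec_remap
  rcases hcase with ⟨hrect, hpad, hwin⟩ | ⟨hpademp, hshort⟩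
  · obtain ⟨p, hp⟩ : ∃ p, padding.toList = [p] := by
      rcases hpad with h | h <;> exact ⟨_, h⟩
    have hL : ∀ s ∈ map, s.toList.length = ((map.headD "").toList).length := by
      intro s hs
      have h := List.all_eq_true.mp hrect s hs
      simp only [Bool.and_eq_true, beq_iff_eq] at h
      exact h.1
    simp only [remap, remap_alt, hp, padded_eq, pvRep_single]
    rw [show List.replicate 2 p = [p, p] from rfl]
    exact core _ decoder.toList ((map.headD "").toList).length (by
      intro r hr
      simp only [List.mem_append, List.mem_cons, List.mem_map, List.not_mem_nil, or_false] at hr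
      rcases hr with ((rfl | rfl) | ⟨s, hs, rfl⟩) | rfl | rfl
      · simp
      · simp
      · simp [hL s hs]
      · simp
      · simp)
  · simp only [remap, remap_alt, hpademp, pvRep_nil, padded_eq_nil,
      List.nil_append, List.append_nil]
    exact core2 _ decoder.toList (by
      intro r hr
      simp only [List.mem_append, List.mem_cons, List.mem_map, List.not_mem_nil, or_false] at hr
      rcases hr with ((rfl | rfl) | ⟨s, hs, rfl⟩) | rfl | rfl
      · simp
      · simp
      · have h := List.all_eq_true.mp hshort s hs
        simpa using h
      · simp
      · simp)
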